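-- pv_equiv track=rewrite | github.com/Clamepending/remote-vibes | experiments/arc-swarm/runs/hybrid/solver.py | _keep_longest_line
-- ===== SOURCE A (Python) =====
-- Grid = list[list[int]]
--
-- def _keep_longest_line(g: Grid) -> Grid:
--     """Find the longest straight horizontal or vertical run of identical
--     non-zero colour; zero everything else."""
--     h = len(g)
--     w = len(g[0])
--     best_len = 0
--     best_cells: set[tuple[int, int]] = set()
--     # horizontal runs
--     for r in range(h):
--         c = 0
--         while c < w:
--             if g[r][c] == 0:
--                 c += 1
--                 continue
--             v = g[r][c]
--             start = c
--             while c < w and g[r][c] == v: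
--                 c += 1
--             length = c - start
--             if length > best_len:
--                 best_len = length
--                 best_cells = {(r, cc) for cc in range(start, c)}
--     # vertical runs
--     for c in range(w):
--         r = 0
--         while r < h:
--             if g[r][c] == 0:
--                 r += 1
--                 continue
--             v = g[r][c]
--             start = r
--             while r < h and g[r][c] == v:
--                 r += 1
--             length = r - start
--             if length > best_len:
--                 best_len = length
--                 best_cells = {(rr, c) for rr in range(start, r)}
--     out = [[0] * w for _ in range(h)]
--     for r, c in best_cells:
--         out[r][c] = g[r][c]
--     return out
-- ===== SOURCE B (Python) =====
-- Grid = list[list[int]]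
--
-- def _ends(line):
--     """Dynamic programming: d[i] = length of the run of identical nonzero
--     values ending at index i (0 on a zero cell)."""
--     d = []
--     run, prev = 0, 0
--     for v in line:
--         run = 0 if v == 0 else run + 1 if v == prev else 1
--         d.append(run)
--         prev = v
--     return d
--
-- def _keep_longest_line(g):
--     h, w = len(g), len(g[0])
--     rows = [[g[r][c] for c in range(w)] for r in range(h)]
--     cols = [[g[r][c] for r in range(h)] for c in range(w)]
--     lines = rows + cols  # horizontals before verticals: A's tie-break order
--     best_len, best = 0, None
--     for k, line in enumerate(lines):
--         d = _ends(line)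
--         n = len(line)
--         for i in range(n):
--             # a maximal run is judged once, at its end cell; strict '>' keeps the first
--             if d[i] > best_len and (i + 1 == n or line[i + 1] != line[i]):
--                 best_len, best = d[i], (k, i)
--     out = [[0] * w for _ in range(h)]
--     if best is not None:
--         k, i = best
--         for j in range(i - best_len + 1, i + 1):
--             r, c = (k, j) if k < h else (j, k - h)
--             out[r][c] = g[r][c]
--     return out
-- ===== Notes on version B (the rewrite author's own statement) =====
-- stated objective: alternative
-- what changed: B is a dynamic-programming reformulation: it builds the row and column lines as explicit lists, computes for each line a DP array d with d[i] = length of the identical-nonzero run ending at i, takes an argmax of d over run-end cells (strict >, horizontals first, so first-wins like A), and reconstructs the painted segment arithmetically from (line, end, length) at the very end — it never jumps run-to-run with nested while loops and never materializes cell sets during the scan as A does.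
-- outside the precondition, e.g. on _keep_longest_line([]): A raises IndexError, B raises IndexError
import Mathlib
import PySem

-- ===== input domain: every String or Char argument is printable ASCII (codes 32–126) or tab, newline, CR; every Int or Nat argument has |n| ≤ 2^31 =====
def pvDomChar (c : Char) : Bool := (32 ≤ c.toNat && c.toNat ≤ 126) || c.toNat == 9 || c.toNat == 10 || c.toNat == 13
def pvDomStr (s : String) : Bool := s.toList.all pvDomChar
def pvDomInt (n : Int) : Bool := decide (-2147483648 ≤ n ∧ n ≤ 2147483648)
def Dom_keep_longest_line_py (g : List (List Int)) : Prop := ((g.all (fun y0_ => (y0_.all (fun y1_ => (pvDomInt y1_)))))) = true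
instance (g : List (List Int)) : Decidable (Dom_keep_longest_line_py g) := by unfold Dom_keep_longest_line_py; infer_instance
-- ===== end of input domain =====

-- B replaces A's run-jumping nested while loops by a dynamic-programming pass: per line
-- (rows first, then columns) an array d with d[i] = run length ending at i, an argmax of d
-- over run-end cells (strict >, first wins like A), and arithmetic reconstruction of the
-- painted segment from (line, end, length). Same asymptotic cost ("alternative").
-- Python A mutates no argument; the equivalence is about the return value.

-- ===== PORT A =====
-- g[r][c]; Pre_ guarantees every access A performs is in range, so a default of 0 is never observed inside Pre_.
def aGet (g : List (List Int)) (r c : Nat) : Int := (g.getD r []).getD c 0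

-- out[r][c] = v
def set2 (out : List (List Int)) (r c : Nat) (v : Int) : List (List Int) :=
  out.modify r (fun row => row.set c v)

-- inner 'while c < w and g[r][c] == v: c += 1'; the fuel (first) argument is a totality
-- guard only: every call supplies fuel = w - c, which the loop can never exhaust.
def runEndHGo (g : List (List Int)) (r : Nat) (v : Int) (w : Nat) : Nat → Nat → Nat
  | 0, c => c
  | fuel + 1, c => if c < w then (if aGet g r c = v then runEndHGo g r v w fuel (c + 1) else c) else c

def runEndH (g : List (List Int)) (r : Nat) (v : Int) (w c : Nat) : Nat :=
  runEndHGo g r v w (w - c) c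

-- 'while c < w:' body of the horizontal loop, threading (best_len, best_cells);
-- fuel = w - c again can never run out (each iteration advances c by at least one).
def hscanGo (g : List (List Int)) (r w : Nat) :
    Nat → Nat → Nat × List (Nat × Nat) → Nat × List (Nat × Nat)
  | 0, _, best => best
  | fuel + 1, c, best =>
    if c < w then
      if aGet g r c = 0 then hscanGo g r w fuel (c + 1) best
      else
        hscanGo g r w fuel (runEndH g r (aGet g r c) w c)
          (if runEndH g r (aGet g r c) w c - c > best.1 then
            (runEndH g r (aGet g r c) w c - c,
              (List.range' c (runEndH g r (aGet g r c) w c - c)).map (fun cc => (r, cc)))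
           else best)
    else best

def hscan (g : List (List Int)) (r w c : Nat) (best : Nat × List (Nat × Nat)) :
    Nat × List (Nat × Nat) :=
  hscanGo g r w (w - c) c best

-- inner 'while r < h and g[r][c] == v: r += 1' (same fuel guard)
def runEndVGo (g : List (List Int)) (c : Nat) (v : Int) (h : Nat) : Nat → Nat → Nat
  | 0, r => r
  | fuel + 1, r => if r < h then (if aGet g r c = v then runEndVGo g c v h fuel (r + 1) else r) else r

def runEndV (g : List (List Int)) (c : Nat) (v : Int) (h r : Nat) : Nat :=
  runEndVGo g c v h (h - r) r

-- 'while r < h:' body of the vertical loop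
def vscanGo (g : List (List Int)) (c h : Nat) :
    Nat → Nat → Nat × List (Nat × Nat) → Nat × List (Nat × Nat)
  | 0, _, best => best
  | fuel + 1, r, best =>
    if r < h then
      if aGet g r c = 0 then vscanGo g c h fuel (r + 1) best
      else
        vscanGo g c h fuel (runEndV g c (aGet g r c) h r)
          (if runEndV g c (aGet g r c) h r - r > best.1 then
            (runEndV g c (aGet g r c) h r - r,
              (List.range' r (runEndV g c (aGet g r c) h r - r)).map (fun rr => (rr, c)))
           else best)
    else best

def vscan (g : List (List Int)) (c h r : Nat) (best : Nat × List (Nat × Nat)) :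
    Nat × List (Nat × Nat) :=
  vscanGo g c h (h - r) r best

-- A: best_cells is a Python set of pairwise-distinct cells iterated to paint 'out';
-- iteration order cannot affect the resulting grid, so the comprehension order is used.
def keep_longest_line_py (g : List (List Int)) : List (List Int) :=
  let h := g.length
  let w := (g.getD 0 []).length
  let best1 := (List.range h).foldl (fun b r => hscan g r w 0 b) (0, ([] : List (Nat × Nat)))
  let best2 := (List.range w).foldl (fun b c => vscan g c h 0 b) best1
  let out0 := List.replicate h (List.replicate w (0 : Int))
  best2.2.foldl (fun o rc => set2 o rc.1 rc.2 (aGet g rc.1 rc.2)) out0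

-- ===== PORT B =====
-- loop body of _ends: state (d, run, prev)
def endsStep (st : List Nat × Nat × Int) (v : Int) : List Nat × Nat × Int :=
  let run := if v = 0 then 0 else if v = st.2.2 then st.2.1 + 1 else 1
  (st.1 ++ [run], run, v)

-- _ends(line): the DP array d
def endsD (line : List Int) : List Nat := (line.foldl endsStep ([], 0, 0)).1

-- body of 'for i in range(n)': update best on a run-end cell with a strictly longer run
def bLineStep (k : Nat) (line : List Int) (d : List Nat) (n : Nat)
    (b : Nat × Option (Nat × Nat)) (i : Nat) : Nat × Option (Nat × Nat) :=
  if d.getD i 0 > b.1 ∧ (i + 1 = n ∨ line.getD (i + 1) 0 ≠ line.getD i 0) then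
    (d.getD i 0, some (k, i))
  else b

-- Python's range(i - best_len + 1, i + 1) is List.range' (i + 1 - L) L here: a run of
-- length L ends at i only with L ≤ i + 1, so the Nat subtraction is exact.
def keep_longest_line_py_alt (g : List (List Int)) : List (List Int) :=
  let h := g.length
  let w := (g.getD 0 []).length
  let rows := (List.range h).map (fun r => (List.range w).map (fun c => aGet g r c))
  let cols := (List.range w).map (fun c => (List.range h).map (fun r => aGet g r c))
  let lines := rows ++ cols
  let best := (lines.zipIdx).foldl (fun b lk =>
      (List.range lk.1.length).foldl (bLineStep lk.2 lk.1 (endsD lk.1) lk.1.length) b)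
    ((0 : Nat), (none : Option (Nat × Nat)))
  let out0 := List.replicate h (List.replicate w (0 : Int))
  match best.2 with
  | none => out0
  | some ki =>
    (List.range' (ki.2 + 1 - best.1) best.1).foldl
      (fun o j =>
        let rc := if ki.1 < h then (ki.1, j) else (j, ki.1 - h)
        set2 o rc.1 rc.2 (aGet g rc.1 rc.2)) out0

-- ===== PRECONDITION & SPEC =====
-- A raises IndexError on g = [] (len(g[0])) and whenever some row is shorter than row 0
-- (both scans index g[r][c] for all c < len(g[0])); exactly those inputs are excluded.
def Pre_keep_longest_line_py (g : List (List Int)) : Prop :=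
  g ≠ [] ∧ ∀ row ∈ g, (g.getD 0 []).length ≤ row.length
instance (g : List (List Int)) : Decidable (Pre_keep_longest_line_py g) := by
  unfold Pre_keep_longest_line_py; infer_instance

def pvWitness_keep_longest_line_py : List (List Int) := [[1, 1, 0], [0, 2, 0]]

def Spec_keep_longest_line_py (g : List (List Int)) (out : List (List Int)) : Prop :=
  out = keep_longest_line_py_alt g
instance (g : List (List Int)) (out : List (List Int)) :
    Decidable (Spec_keep_longest_line_py g out) := by
  unfold Spec_keep_longest_line_py; infer_instance

-- ===== CLAIM (what is proved, stated in full; the proofs are below) =====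
def Claim_equal_keep_longest_line_py : Prop :=
  ∀ (g : List (List Int)), Dom_keep_longest_line_py g → Pre_keep_longest_line_py g →
    Spec_keep_longest_line_py g (keep_longest_line_py g)

-- ===== LEMMAS AND PROOFS =====

-- length of the leading block of value v
def blk (v : Int) : List Int → Nat
  | [] => 0
  | x :: xs => if x = v then blk v xs + 1 else 0

theorem blk_le_length (v : Int) (l : List Int) : blk v l ≤ l.length := by
  induction l with
  | nil => simp [blk]
  | cons x xs ih => simp only [blk, List.length_cons]; split <;> omega

theorem blk_cons_self (v : Int) (rest : List Int) : blk v (v :: rest) = blk v rest + 1 := by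
  simp [blk]

theorem blk_getD (v : Int) (l : List Int) : ∀ j, j < blk v l → l.getD j 0 = v := by
  induction l with
  | nil => simp [blk]
  | cons x xs ih =>
    intro j hj
    by_cases hx : x = v
    · subst hx
      cases j with
      | zero => rfl
      | succ j =>
        rw [blk_cons_self] at hj
        exact ih j (by omega)
    · simp [blk, hx] at hj

theorem blk_max (v : Int) (l : List Int) : blk v l = l.length ∨ l.getD (blk v l) 0 ≠ v := by
  induction l with
  | nil => left; rfl
  | cons x xs ih =>
    by_cases hx : x = v
    · subst hx
      rw [blk_cons_self]
      rcases ih with h | h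
      · left; simp [h]
      · right; simpa using h
    · right; simp [blk, hx]

def shiftRun (k : Nat) (t : Nat × Nat × Nat) : Nat × Nat × Nat := (t.1, t.2.1 + k, t.2.2 + k)

-- reference: the maximal nonzero runs of a sequence, built recursively block by block
def refRuns : List Int → List (Nat × Nat × Nat)
  | [] => []
  | x :: xs =>
    (if x ≠ 0 then [(blk x (x :: xs), 0, blk x (x :: xs))] else []) ++
      (refRuns ((x :: xs).drop (blk x (x :: xs)))).map (shiftRun (blk x (x :: xs)))
termination_by l => l.length
decreasing_by
  rw [show blk x (x :: xs) = blk x xs + 1 from by simp [blk]]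
  have := blk_le_length x xs
  simp only [List.length_drop, List.length_cons]
  omega

theorem refRuns_cons (x : Int) (xs : List Int) :
    refRuns (x :: xs) = (if x ≠ 0 then [(blk x (x :: xs), 0, blk x (x :: xs))] else []) ++
      (refRuns ((x :: xs).drop (blk x (x :: xs)))).map (shiftRun (blk x (x :: xs))) := by
  rw [refRuns]

theorem refRuns_nil : refRuns [] = [] := by rw [refRuns]

-- every run is nonempty and its end is start + length
theorem refRuns_wf (l : List Int) : ∀ t ∈ refRuns l, 0 < t.1 ∧ t.2.2 = t.2.1 + t.1 := by
  fun_induction refRuns l with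
  | case1 => intro t ht; cases ht
  | case2 x xs ih =>
    intro t ht
    rcases List.mem_append.1 ht with h | h
    · rcases Decidable.em (x = 0) with hx | hx
      · simp [hx] at h
      · simp only [if_pos hx, List.mem_singleton] at h
        subst h; simp [blk]
    · obtain ⟨t', ht', rfl⟩ := List.mem_map.1 h
      have := ih t' ht'
      simp only [shiftRun]
      exact ⟨this.1, by omega⟩

-- zero head shifts the runs by one
theorem shiftRun_shiftRun (a b : Nat) (t : Nat × Nat × Nat) :
    shiftRun a (shiftRun b t) = shiftRun (b + a) t := by
  simp [shiftRun]; omega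

theorem refRuns_zero_cons (l : List Int) :
    refRuns (0 :: l) = (refRuns l).map (shiftRun 1) := by
  match l with
  | [] => rw [refRuns_cons]; simp [blk, refRuns]
  | (y :: l') =>
    rcases Decidable.em (y = 0) with hy | hy
    · subst hy
      rw [refRuns_cons, refRuns_cons]
      have hb2 : blk 0 (0 :: 0 :: l') = blk 0 l' + 1 + 1 := by simp [blk]
      have hb1 : blk 0 (0 :: l') = blk 0 l' + 1 := by simp [blk]
      rw [hb2, hb1]
      simp only [ne_eq, not_true_eq_false, if_false, List.drop_succ_cons, List.nil_append,
        List.map_map]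
      apply List.map_congr_left
      intro t _
      simp [Function.comp, shiftRun]
      omega
    · rw [refRuns_cons]
      have hb : blk 0 (0 :: y :: l') = 1 := by simp [blk, hy]
      rw [hb]
      simp

-- getD bridges
theorem getD_take_lt (l : List Int) (w c : Nat) (hc : c < w) :
    (l.take w).getD c 0 = l.getD c 0 := by
  simp [List.getD_eq_getElem?_getD, hc]

theorem getD_col (g : List (List Int)) (c h i : Nat) (hi : i < h) :
    ((List.range h).map (fun r => aGet g r c)).getD i 0 = aGet g i c := by
  simp [List.getD_eq_getElem?_getD, List.getElem?_map, List.getElem?_range hi]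

theorem getD_drop (l : List Int) (s j : Nat) : (l.drop s).getD j 0 = l.getD (s + j) 0 := by
  simp [List.getD_eq_getElem?_getD, List.getElem?_drop]

-- runEnd computes c + length of the leading constant block
theorem runEndHGo_blk (g : List (List Int)) (r w : Nat) (hw : w ≤ (g.getD r []).length) (v : Int) :
    ∀ fuel c, c ≤ w → w - c ≤ fuel →
      runEndHGo g r v w fuel c = c + blk v (((g.getD r []).take w).drop c) := by
  have hlen : ((g.getD r []).take w).length = w := by rw [List.length_take]; omega
  intro fuel
  induction fuel with
  | zero =>
    intro c hc hf
    rw [List.drop_eq_nil_of_le (by omega)]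
    simp [runEndHGo, blk]
  | succ fuel ih =>
    intro c hc hf
    by_cases hcw : c < w
    · have hcl : c < ((g.getD r []).take w).length := by omega
      by_cases hv : aGet g r c = v
      · have hget : ((g.getD r []).take w)[c] = v := by
          rw [← List.getD_eq_getElem _ 0 hcl, getD_take_lt _ _ _ hcw]
          exact hv
        rw [show runEndHGo g r v w (fuel + 1) c = runEndHGo g r v w fuel (c + 1) from by
          simp [runEndHGo, hcw, hv]]
        rw [List.drop_eq_getElem_cons hcl, hget, blk_cons_self, ih (c + 1) (by omega) (by omega)]
        omega
      · have hget : ((g.getD r []).take w)[c] = aGet g r c := by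
          rw [← List.getD_eq_getElem _ 0 hcl, getD_take_lt _ _ _ hcw]; rfl
        rw [show runEndHGo g r v w (fuel + 1) c = c from by simp [runEndHGo, hcw, hv]]
        rw [List.drop_eq_getElem_cons hcl, hget]
        simp [blk, hv]
    · rw [show runEndHGo g r v w (fuel + 1) c = c from by simp [runEndHGo, hcw]]
      rw [List.drop_eq_nil_of_le (by omega)]
      simp [blk]

theorem runEndH_blk (g : List (List Int)) (r w : Nat) (hw : w ≤ (g.getD r []).length) (v : Int) :
    ∀ c, c ≤ w → runEndH g r v w c = c + blk v (((g.getD r []).take w).drop c) :=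
  fun c hc => runEndHGo_blk g r w hw v (w - c) c hc (Nat.le_refl _)

theorem runEndVGo_blk (g : List (List Int)) (c h : Nat) (v : Int) :
    ∀ fuel r, r ≤ h → h - r ≤ fuel →
      runEndVGo g c v h fuel r = r + blk v (((List.range h).map (fun rr => aGet g rr c)).drop r) := by
  have hlen : ((List.range h).map (fun rr => aGet g rr c)).length = h := by simp
  intro fuel
  induction fuel with
  | zero =>
    intro r hr hf
    rw [List.drop_eq_nil_of_le (by omega)]
    simp [runEndVGo, blk]
  | succ fuel ih =>
    intro r hr hf
    by_cases hrh : r < h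
    · have hrl : r < ((List.range h).map (fun rr => aGet g rr c)).length := by omega
      by_cases hv : aGet g r c = v
      · have hget : ((List.range h).map (fun rr => aGet g rr c))[r] = v := by
          rw [← List.getD_eq_getElem _ 0 hrl, getD_col g c h r hrh]
          exact hv
        rw [show runEndVGo g c v h (fuel + 1) r = runEndVGo g c v h fuel (r + 1) from by
          simp [runEndVGo, hrh, hv]]
        rw [List.drop_eq_getElem_cons hrl, hget, blk_cons_self, ih (r + 1) (by omega) (by omega)]
        omega
      · have hget : ((List.range h).map (fun rr => aGet g rr c))[r] = aGet g r c := by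
          rw [← List.getD_eq_getElem _ 0 hrl, getD_col g c h r hrh]
        rw [show runEndVGo g c v h (fuel + 1) r = r from by simp [runEndVGo, hrh, hv]]
        rw [List.drop_eq_getElem_cons hrl, hget]
        simp [blk, hv]
    · rw [show runEndVGo g c v h (fuel + 1) r = r from by simp [runEndVGo, hrh]]
      rw [List.drop_eq_nil_of_le (by omega)]
      simp [blk]

theorem runEndV_blk (g : List (List Int)) (c h : Nat) (v : Int) :
    ∀ r, r ≤ h → runEndV g c v h r = r + blk v (((List.range h).map (fun rr => aGet g rr c)).drop r) :=
  fun r hr => runEndVGo_blk g c h v (h - r) r hr (Nat.le_refl _)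

def mkCells (flip : Bool) (o : Nat) (t : Nat × Nat × Nat) : Nat × List (Nat × Nat) :=
  (t.1, (List.range' t.2.1 (t.2.2 - t.2.1)).map (fun i => if flip then (i, o) else (o, i)))

def updf (b t : Nat × List (Nat × Nat)) : Nat × List (Nat × Nat) := if t.1 > b.1 then t else b

theorem hscanGo_eq (g : List (List Int)) (r w : Nat) (hw : w ≤ (g.getD r []).length) :
    ∀ fuel c best, c ≤ w → w - c ≤ fuel →
      hscanGo g r w fuel c best =
        ((refRuns (((g.getD r []).take w).drop c)).map
          (fun t => mkCells false r (shiftRun c t))).foldl updf best := by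
  have hlen : ((g.getD r []).take w).length = w := by rw [List.length_take]; omega
  intro fuel
  induction fuel with
  | zero =>
    intro c best hc hf
    rw [List.drop_eq_nil_of_le (by omega), refRuns_nil]
    rfl
  | succ fuel ih =>
    intro c best hc hf
    by_cases hcw : c < w
    · have hcl : c < ((g.getD r []).take w).length := by omega
      by_cases h0 : aGet g r c = 0
      · have hget : ((g.getD r []).take w)[c] = (0 : Int) := by
          rw [← List.getD_eq_getElem _ 0 hcl, getD_take_lt _ _ _ hcw]; exact h0
        rw [show hscanGo g r w (fuel + 1) c best = hscanGo g r w fuel (c + 1) best from by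
          simp [hscanGo, hcw, h0]]
        rw [List.drop_eq_getElem_cons hcl, hget, refRuns_zero_cons, List.map_map,
          show ((fun t => mkCells false r (shiftRun c t)) ∘ shiftRun 1)
              = (fun t => mkCells false r (shiftRun (c + 1) t)) from
            funext fun t => by rw [Function.comp_apply, shiftRun_shiftRun, Nat.add_comm 1 c]]
        exact ih (c + 1) best (by omega) (by omega)
      · have he : runEndH g r (aGet g r c) w c
            = c + blk (aGet g r c) (((g.getD r []).take w).drop c) :=
          runEndH_blk g r w hw _ c (by omega)
        have hdc : ((g.getD r []).take w).drop c
            = aGet g r c :: ((g.getD r []).take w).drop (c + 1) := by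
          rw [List.drop_eq_getElem_cons hcl, ← List.getD_eq_getElem _ 0 hcl,
            getD_take_lt _ _ _ hcw]; rfl
        have hble : blk (aGet g r c) (((g.getD r []).take w).drop c) ≤ w - c := by
          have := blk_le_length (aGet g r c) (((g.getD r []).take w).drop c)
          rw [List.length_drop, hlen] at this
          omega
        have hpos : 1 ≤ blk (aGet g r c) (((g.getD r []).take w).drop c) := by
          rw [hdc, blk_cons_self]
          omega
        rw [show hscanGo g r w (fuel + 1) c best
            = hscanGo g r w fuel (runEndH g r (aGet g r c) w c)
                (if runEndH g r (aGet g r c) w c - c > best.1 then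
                  (runEndH g r (aGet g r c) w c - c,
                    (List.range' c (runEndH g r (aGet g r c) w c - c)).map (fun cc => (r, cc)))
                 else best) from by simp [hscanGo, hcw, h0]]
        rw [he, ih _ _ (by omega) (by omega)]
        conv_rhs => rw [hdc, refRuns_cons, ← hdc]
        rw [if_pos h0, List.drop_drop, List.map_append, List.map_cons, List.map_map,
          List.foldl_append, List.foldl_cons,
          show ((fun t => mkCells false r (shiftRun c t)) ∘ shiftRun (blk (aGet g r c) (((g.getD r []).take w).drop c)))
              = (fun t => mkCells false r (shiftRun (c + blk (aGet g r c) (((g.getD r []).take w).drop c)) t)) from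
            funext fun t => by rw [Function.comp_apply, shiftRun_shiftRun, Nat.add_comm]]
        simp only [List.map_nil, List.foldl_nil]
        congr 1
        simp only [updf, mkCells, shiftRun, Nat.zero_add, Nat.add_sub_cancel, Nat.add_sub_cancel_left,
          Bool.false_eq_true, if_false]
    · rw [show hscanGo g r w (fuel + 1) c best = best from by simp [hscanGo, hcw]]
      rw [List.drop_eq_nil_of_le (by omega), refRuns_nil]
      rfl

theorem hscan_eq (g : List (List Int)) (r w : Nat) (hw : w ≤ (g.getD r []).length) :
    ∀ c best, c ≤ w →
      hscan g r w c best =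
        ((refRuns (((g.getD r []).take w).drop c)).map
          (fun t => mkCells false r (shiftRun c t))).foldl updf best :=
  fun c best hc => hscanGo_eq g r w hw (w - c) c best hc (Nat.le_refl _)

theorem vscanGo_eq (g : List (List Int)) (c h : Nat) :
    ∀ fuel r best, r ≤ h → h - r ≤ fuel →
      vscanGo g c h fuel r best =
        ((refRuns (((List.range h).map (fun rr => aGet g rr c)).drop r)).map
          (fun t => mkCells true c (shiftRun r t))).foldl updf best := by
  have hlen : ((List.range h).map (fun rr => aGet g rr c)).length = h := by simp
  intro fuel
  induction fuel with
  | zero =>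
    intro r best hr hf
    rw [List.drop_eq_nil_of_le (by omega), refRuns_nil]
    rfl
  | succ fuel ih =>
    intro r best hr hf
    by_cases hrh : r < h
    · have hrl : r < ((List.range h).map (fun rr => aGet g rr c)).length := by omega
      by_cases h0 : aGet g r c = 0
      · have hget : ((List.range h).map (fun rr => aGet g rr c))[r] = (0 : Int) := by
          rw [← List.getD_eq_getElem _ 0 hrl, getD_col g c h r hrh]; exact h0
        rw [show vscanGo g c h (fuel + 1) r best = vscanGo g c h fuel (r + 1) best from by
          simp [vscanGo, hrh, h0]]
        rw [List.drop_eq_getElem_cons hrl, hget, refRuns_zero_cons, List.map_map,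
          show ((fun t => mkCells true c (shiftRun r t)) ∘ shiftRun 1)
              = (fun t => mkCells true c (shiftRun (r + 1) t)) from
            funext fun t => by rw [Function.comp_apply, shiftRun_shiftRun, Nat.add_comm 1 r]]
        exact ih (r + 1) best (by omega) (by omega)
      · have he : runEndV g c (aGet g r c) h r
            = r + blk (aGet g r c) (((List.range h).map (fun rr => aGet g rr c)).drop r) :=
          runEndV_blk g c h _ r (by omega)
        have hdc : ((List.range h).map (fun rr => aGet g rr c)).drop r
            = aGet g r c :: ((List.range h).map (fun rr => aGet g rr c)).drop (r + 1) := by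
          rw [List.drop_eq_getElem_cons hrl, ← List.getD_eq_getElem _ 0 hrl, getD_col g c h r hrh]
        have hble : blk (aGet g r c) (((List.range h).map (fun rr => aGet g rr c)).drop r) ≤ h - r := by
          have := blk_le_length (aGet g r c) (((List.range h).map (fun rr => aGet g rr c)).drop r)
          rw [List.length_drop, hlen] at this
          omega
        have hpos : 1 ≤ blk (aGet g r c) (((List.range h).map (fun rr => aGet g rr c)).drop r) := by
          rw [hdc, blk_cons_self]
          omega
        rw [show vscanGo g c h (fuel + 1) r best
            = vscanGo g c h fuel (runEndV g c (aGet g r c) h r)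
                (if runEndV g c (aGet g r c) h r - r > best.1 then
                  (runEndV g c (aGet g r c) h r - r,
                    (List.range' r (runEndV g c (aGet g r c) h r - r)).map (fun rr => (rr, c)))
                 else best) from by simp [vscanGo, hrh, h0]]
        rw [he, ih _ _ (by omega) (by omega)]
        conv_rhs => rw [hdc, refRuns_cons, ← hdc]
        rw [if_pos h0, List.drop_drop, List.map_append, List.map_cons, List.map_map,
          List.foldl_append, List.foldl_cons,
          show ((fun t => mkCells true c (shiftRun r t)) ∘ shiftRun (blk (aGet g r c) (((List.range h).map (fun rr => aGet g rr c)).drop r)))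
              = (fun t => mkCells true c (shiftRun (r + blk (aGet g r c) (((List.range h).map (fun rr => aGet g rr c)).drop r)) t)) from
            funext fun t => by rw [Function.comp_apply, shiftRun_shiftRun, Nat.add_comm]]
        simp only [List.map_nil, List.foldl_nil]
        congr 1
        simp only [updf, mkCells, shiftRun, Nat.zero_add, Nat.add_sub_cancel, Nat.add_sub_cancel_left,
          if_true]
    · rw [show vscanGo g c h (fuel + 1) r best = best from by simp [vscanGo, hrh]]
      rw [List.drop_eq_nil_of_le (by omega), refRuns_nil]
      rfl

theorem vscan_eq (g : List (List Int)) (c h : Nat) :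
    ∀ r best, r ≤ h →
      vscan g c h r best =
        ((refRuns (((List.range h).map (fun rr => aGet g rr c)).drop r)).map
          (fun t => mkCells true c (shiftRun r t))).foldl updf best :=
  fun r best hr => vscanGo_eq g c h (h - r) r best hr (Nat.le_refl _)

theorem pvFoldlCongr {α β : Type} (L : List α) (f f' : β → α → β)
    (h : ∀ b x, x ∈ L → f b x = f' b x) : ∀ b, L.foldl f b = L.foldl f' b := by
  induction L with
  | nil => intro b; rfl
  | cons x xs ih =>
    intro b
    simp only [List.foldl_cons, h b x (List.mem_cons_self), ih (fun b y hy => h b y (List.mem_cons_of_mem _ hy))]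

theorem pvFoldlInner {α β γ : Type} (L : List α) (f : α → List β) (u : γ → β → γ) :
    ∀ b0, L.foldl (fun b x => (f x).foldl u b) b0 = (L.flatMap f).foldl u b0 := by
  induction L with
  | nil => intro b0; rfl
  | cons x xs ih => intro b0; simp [List.foldl_append, ih]

def hflat (g : List (List Int)) : List (Nat × List (Nat × Nat)) :=
  (List.range g.length).flatMap (fun r =>
    (refRuns ((g.getD r []).take (g.getD 0 []).length)).map (fun t => mkCells false r (shiftRun 0 t)))

def vflat (g : List (List Int)) : List (Nat × List (Nat × Nat)) :=
  (List.range (g.getD 0 []).length).flatMap (fun c =>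
    (refRuns ((List.range g.length).map (fun rr => aGet g rr c))).map (fun t => mkCells true c (shiftRun 0 t)))

theorem A_best (g : List (List Int))
    (hrows : ∀ row ∈ g, (g.getD 0 []).length ≤ row.length) :
    keep_longest_line_py g =
      (((hflat g ++ vflat g).foldl updf (0, ([] : List (Nat × Nat)))).2).foldl
        (fun o rc => set2 o rc.1 rc.2 (aGet g rc.1 rc.2))
        (List.replicate g.length (List.replicate (g.getD 0 []).length (0 : Int))) := by
  have hw : ∀ r, r < g.length → (g.getD 0 []).length ≤ (g.getD r []).length := by
    intro r hr
    apply hrows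
    rw [List.getD_eq_getElem _ _ hr]
    exact List.getElem_mem hr
  have h1 : ∀ b : Nat × List (Nat × Nat),
      (List.range g.length).foldl (fun b r => hscan g r (g.getD 0 []).length 0 b) b
        = (hflat g).foldl updf b := by
    intro b
    rw [pvFoldlCongr (List.range g.length)
      (fun b r => hscan g r (g.getD 0 []).length 0 b)
      (fun b r => ((refRuns ((g.getD r []).take (g.getD 0 []).length)).map
        (fun t => mkCells false r (shiftRun 0 t))).foldl updf b)
      (fun b r hrm => by
        show hscan g r (g.getD 0 []).length 0 b = _
        rw [hscan_eq g r _ (hw r (List.mem_range.1 hrm)) 0 b (Nat.zero_le _), List.drop_zero]) b]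
    unfold hflat
    exact pvFoldlInner _ _ updf b
  have h2 : ∀ b : Nat × List (Nat × Nat),
      (List.range (g.getD 0 []).length).foldl (fun b c => vscan g c g.length 0 b) b
        = (vflat g).foldl updf b := by
    intro b
    rw [pvFoldlCongr (List.range (g.getD 0 []).length)
      (fun b c => vscan g c g.length 0 b)
      (fun b c => ((refRuns ((List.range g.length).map (fun rr => aGet g rr c))).map
        (fun t => mkCells true c (shiftRun 0 t))).foldl updf b)
      (fun b c hcm => by
        show vscan g c g.length 0 b = _
        rw [vscan_eq g c g.length 0 b (Nat.zero_le _), List.drop_zero]) b]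
    unfold vflat
    exact pvFoldlInner _ _ updf b
  show (List.foldl (fun o rc => set2 o rc.1 rc.2 (aGet g rc.1 rc.2))
      (List.replicate g.length (List.replicate (g.getD 0 []).length (0 : Int)))
      ((List.foldl (fun b c => vscan g c g.length 0 b)
        (List.foldl (fun b r => hscan g r (g.getD 0 []).length 0 b)
          (0, ([] : List (Nat × Nat))) (List.range g.length))
        (List.range (g.getD 0 []).length)).2)) = _
  rw [h1, h2, ← List.foldl_append]

-- ===== B-side: the DP array, per-line scan, and best-state correspondence =====

-- structural spec of _ends (state (run, prev) carried through the list)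
def dvL : List Int → Nat → Int → List Nat
  | [], _, _ => []
  | v :: vs, run, pv =>
    (if v = 0 then 0 else if v = pv then run + 1 else 1) ::
      dvL vs (if v = 0 then 0 else if v = pv then run + 1 else 1) v

theorem endsD_foldl (seq : List Int) :
    ∀ acc run pv, (seq.foldl endsStep (acc, run, pv)).1 = acc ++ dvL seq run pv := by
  induction seq with
  | nil => intro acc run pv; simp [dvL]
  | cons v vs ih =>
    intro acc run pv
    rw [List.foldl_cons, show endsStep (acc, run, pv) v
        = (acc ++ [if v = 0 then 0 else if v = pv then run + 1 else 1],
           (if v = 0 then 0 else if v = pv then run + 1 else 1), v) from rfl,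
      ih, dvL, List.append_assoc]
    rfl

theorem endsD_eq (seq : List Int) : endsD seq = dvL seq 0 0 := by
  unfold endsD
  rw [endsD_foldl]
  rfl

theorem dv_head (seq : List Int) (run : Nat) (pv : Int) (h : 0 < seq.length) :
    (dvL seq run pv).getD 0 0
      = if seq.getD 0 0 = 0 then 0 else if seq.getD 0 0 = pv then run + 1 else 1 := by
  cases seq with
  | nil => simp at h
  | cons v vs => rfl

theorem dv_succ (seq : List Int) :
    ∀ (i : Nat) (run : Nat) (pv : Int), i + 1 < seq.length →
      (dvL seq run pv).getD (i + 1) 0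
        = if seq.getD (i + 1) 0 = 0 then 0
          else if seq.getD (i + 1) 0 = seq.getD i 0 then (dvL seq run pv).getD i 0 + 1 else 1 := by
  induction seq with
  | nil => intro i run pv h; simp at h
  | cons v vs ih =>
    intro i run pv h
    cases i with
    | zero =>
      have h0 : 0 < vs.length := by simpa using h
      show (dvL vs _ v).getD 0 0 = _
      rw [dv_head vs _ v h0]
      rfl
    | succ i =>
      have h' : i + 1 < vs.length := by simpa using h
      show (dvL vs _ v).getD (i + 1) 0 = _
      rw [ih i _ v h']
      rfl

-- d[i] = 0 on a zero cell
theorem dD_zero (seq : List Int) (i : Nat) (hi : i < seq.length) (h0 : seq.getD i 0 = 0) :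
    (endsD seq).getD i 0 = 0 := by
  rw [endsD_eq]
  cases i with
  | zero => rw [dv_head seq 0 0 hi, if_pos h0]
  | succ i => rw [dv_succ seq i 0 0 hi, if_pos h0]

-- d on a constant nonzero block starting at a boundary
theorem dD_block (seq : List Int) (s : Nat) (v : Int) (hv : v ≠ 0)
    (hbd : s = 0 ∨ seq.getD (s - 1) 0 ≠ v) :
    ∀ j, s + j < seq.length → (∀ t, t ≤ j → seq.getD (s + t) 0 = v) →
      (endsD seq).getD (s + j) 0 = j + 1 := by
  intro j
  induction j with
  | zero =>
    intro hlt hconst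
    have hs : seq.getD s 0 = v := hconst 0 (Nat.le_refl 0)
    rw [endsD_eq]
    cases s with
    | zero =>
      rw [dv_head seq 0 0 (by simpa using hlt)]
      rw [hs, if_neg hv, if_neg (by simpa using hv)]
    | succ m =>
      have : (m + 1) + 0 = m + 1 := rfl
      rw [this, dv_succ seq m 0 0 (by omega)]
      rw [hs, if_neg hv]
      rcases hbd with hbd | hbd
      · omega
      · have hbd' : seq.getD (m + 1 - 1) 0 ≠ v := hbd
        rw [if_neg (fun hc => hbd' hc.symm)]
  | succ j ihj =>
    intro hlt hconst
    have h1 : seq.getD (s + (j + 1)) 0 = v := hconst (j + 1) (Nat.le_refl _)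
    have h2 : seq.getD (s + j) 0 = v := hconst j (by omega)
    rw [endsD_eq, show s + (j + 1) = (s + j) + 1 from by omega,
      dv_succ seq (s + j) 0 0 (by omega), h2,
      show seq.getD (s + j + 1) 0 = v from by rwa [show s + j + 1 = s + (j + 1) from by omega],
      if_neg hv, if_pos rfl, ← endsD_eq, ihj (by omega) (fun t ht => hconst t (by omega))]

-- a fold whose steps are all no-ops is the identity
theorem foldl_id_of {α β : Type} (L : List α) (f : β → α → β)
    (h : ∀ b x, x ∈ L → f b x = b) : ∀ b, L.foldl f b = b := by
  induction L with
  | nil => intro b; rfl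
  | cons x xs ih =>
    intro b
    rw [List.foldl_cons, h b x (List.mem_cons_self)]
    exact ih (fun b y hy => h b y (List.mem_cons_of_mem _ hy)) b

-- abstract best update on a run descriptor (k, L, end)
def updB (b : Nat × Option (Nat × Nat)) (e : Nat × Nat × Nat) : Nat × Option (Nat × Nat) :=
  if e.2.1 > b.1 then (e.2.1, some (e.1, e.2.2)) else b

-- the per-line scan, block by block
theorem scanB (seq : List Int) (k : Nat) :
    ∀ (m s : Nat), m = seq.length - s →
      (s = 0 ∨ seq.getD (s - 1) 0 ≠ seq.getD s 0 ∨ seq.getD s 0 = 0) →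
      ∀ b, (List.range' s (seq.length - s)).foldl
              (bLineStep k seq (endsD seq) seq.length) b
        = ((refRuns (seq.drop s)).map (fun t => (k, t.1, s + t.2.1 + t.1 - 1))).foldl updB b := by
  intro m
  induction m using Nat.strong_induction_on with
  | _ m ih =>
    intro s hm hbd b
    by_cases hsn : seq.length ≤ s
    · rw [show seq.length - s = 0 from by omega, List.range'_zero,
        List.drop_eq_nil_of_le hsn, refRuns_nil]
      rfl
    · have hs : s < seq.length := by omega
      set v := seq.getD s 0 with hv
      have hdc : seq.drop s = v :: seq.drop (s + 1) := by
        rw [List.drop_eq_getElem_cons hs, hv, List.getD_eq_getElem seq 0 hs]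
      set k0 := blk v (seq.drop s) with hk0
      have hk0pos : 1 ≤ k0 := by rw [hk0, hdc, blk_cons_self]; omega
      have hk0le : k0 ≤ seq.length - s := by
        have := blk_le_length v (seq.drop s)
        rwa [List.length_drop] at this
      have hconst : ∀ j, j < k0 → seq.getD (s + j) 0 = v := by
        intro j hj
        have := blk_getD v (seq.drop s) j hj
        rwa [getD_drop] at this
      have hmax : s + k0 = seq.length ∨ seq.getD (s + k0) 0 ≠ v := by
        rcases blk_max v (seq.drop s) with h | h
        · left; rw [List.length_drop] at h; omega
        · right; rwa [getD_drop] at h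
      have hdrop2 : (seq.drop s).drop k0 = seq.drop (s + k0) := by
        rw [List.drop_drop]
      have hmapshift : ∀ L : List (Nat × Nat × Nat),
          (L.map (shiftRun k0)).map (fun t => ((k, t.1, s + t.2.1 + t.1 - 1) : Nat × Nat × Nat))
            = L.map (fun t => (k, t.1, (s + k0) + t.2.1 + t.1 - 1)) := by
        intro L
        rw [List.map_map]
        apply List.map_congr_left
        intro t _
        simp only [Function.comp_apply, shiftRun]
        congr 1
        congr 1
        omega
      have hsplit : List.range' s (seq.length - s)
          = List.range' s k0 ++ List.range' (s + k0) (seq.length - (s + k0)) := by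
        rw [List.range'_append_1]
        congr 1
        omega
      have hrest : ∀ b', (List.range' (s + k0) (seq.length - (s + k0))).foldl
              (bLineStep k seq (endsD seq) seq.length) b'
          = ((refRuns (seq.drop (s + k0))).map
              (fun t => (k, t.1, (s + k0) + t.2.1 + t.1 - 1))).foldl updB b' := by
        intro b'
        by_cases hend : s + k0 = seq.length
        · rw [show seq.length - (s + k0) = 0 from by omega, List.range'_zero,
            List.drop_eq_nil_of_le (by omega), refRuns_nil]
          rfl
        · have hne : seq.getD (s + k0) 0 ≠ v := by
            rcases hmax with h | h
            · omega
            · exact h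
          refine ih (seq.length - (s + k0)) (by omega) (s + k0) rfl (Or.inr ?_) b'
          by_cases hz : seq.getD (s + k0) 0 = 0
          · exact Or.inr hz
          · left
            rw [show s + k0 - 1 = s + (k0 - 1) from by omega, hconst (k0 - 1) (by omega)]
            exact fun hcon => hne hcon.symm
      by_cases hv0 : v = 0
      · -- zero block: no candidate, recurse past it
        have hskip : (List.range' s k0).foldl (bLineStep k seq (endsD seq) seq.length) b = b := by
          refine foldl_id_of _ _ (fun b' i hi => ?_) b
          obtain ⟨j, hj, rfl⟩ :
              ∃ j, j < k0 ∧ s + j = i := by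
            rcases List.mem_range'_1.1 hi with ⟨h1, h2⟩
            exact ⟨i - s, by omega, by omega⟩
          have hz : (endsD seq).getD (s + j) 0 = 0 :=
            dD_zero seq (s + j) (by omega) (by rw [hconst j hj, hv0])
          unfold bLineStep
          rw [if_neg]
          rintro ⟨hgt, -⟩
          rw [hz] at hgt
          omega
        rw [hsplit, List.foldl_append, hskip, hrest b]
        conv_rhs => rw [hdc, refRuns_cons, ← hdc]
        rw [← hk0, if_neg (by simpa using hv0), List.nil_append, hdrop2, hmapshift]
      · -- nonzero block: skip k0-1 cells, then one updB step at the end cell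
        have hsplit2 : List.range' s k0 = List.range' s (k0 - 1) ++ [s + (k0 - 1)] := by
          rw [show k0 = (k0 - 1) + 1 from by omega, List.range'_1_concat]
          simp
        have hskip : ∀ b', (List.range' s (k0 - 1)).foldl
            (bLineStep k seq (endsD seq) seq.length) b' = b' := by
          intro b'
          refine foldl_id_of _ _ (fun b'' i hi => ?_) b'
          obtain ⟨j, hj, rfl⟩ : ∃ j, j < k0 - 1 ∧ s + j = i := by
            rcases List.mem_range'_1.1 hi with ⟨h1, h2⟩
            exact ⟨i - s, by omega, by omega⟩
          unfold bLineStep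
          rw [if_neg]
          rintro ⟨-, hend | hne⟩
          · omega
          · exact hne (by
              rw [show s + j + 1 = s + (j + 1) from by omega, hconst (j + 1) (by omega),
                hconst j (by omega)])
        have hdend : (endsD seq).getD (s + (k0 - 1)) 0 = k0 := by
          rw [dD_block seq s v hv0
            (by rcases hbd with h | h
                · exact Or.inl h
                · rcases h with h | h
                  · exact Or.inr h
                  · exact absurd h hv0)
            (k0 - 1) (by omega) (fun t ht => hconst t (by omega))]
          omega
        have hstep : ∀ b', bLineStep k seq (endsD seq) seq.length b' (s + (k0 - 1))
            = updB b' (k, k0, s + k0 - 1) := by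
          intro b'
          unfold bLineStep updB
          have hendc : (s + (k0 - 1)) + 1 = seq.length
              ∨ seq.getD ((s + (k0 - 1)) + 1) 0 ≠ seq.getD (s + (k0 - 1)) 0 := by
            rcases hmax with h | h
            · left; omega
            · right
              rw [show (s + (k0 - 1)) + 1 = s + k0 from by omega, hconst (k0 - 1) (by omega)]
              exact h
          rw [hdend]
          by_cases hgt : k0 > b'.1
          · rw [if_pos ⟨hgt, hendc⟩, if_pos hgt,
              show s + (k0 - 1) = s + k0 - 1 from by omega]
          · rw [if_neg (fun hc => hgt hc.1), if_neg hgt]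
        rw [hsplit, List.foldl_append, hsplit2, List.foldl_append, hskip,
          List.foldl_cons, List.foldl_nil, hstep, hrest]
        conv_rhs => rw [hdc, refRuns_cons, ← hdc]
        rw [← hk0, if_pos hv0, hdrop2, List.map_append, hmapshift, List.foldl_append]
        congr 1

theorem lineFold (seq : List Int) (k : Nat) (b : Nat × Option (Nat × Nat)) :
    (List.range seq.length).foldl (bLineStep k seq (endsD seq) seq.length) b
      = ((refRuns seq).map (fun t => ((k, t.1, t.2.1 + t.1 - 1) : Nat × Nat × Nat))).foldl updB b := by
  rw [List.range_eq_range', show List.range' 0 seq.length = List.range' 0 (seq.length - 0) from by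
    simp, scanB seq k (seq.length - 0) 0 rfl (Or.inl rfl) b, List.drop_zero]
  congr 1
  apply List.map_congr_left
  intro t _
  simp

-- reconstruction of the best run's cell list from (k, L, end)
def oneCells (h : Nat) (e : Nat × Nat × Nat) : List (Nat × Nat) :=
  if e.1 < h then (List.range' (e.2.2 + 1 - e.2.1) e.2.1).map (fun j => (e.1, j))
  else (List.range' (e.2.2 + 1 - e.2.1) e.2.1).map (fun j => (j, e.1 - h))

def toA (h : Nat) (e : Nat × Nat × Nat) : Nat × List (Nat × Nat) := (e.2.1, oneCells h e)

def recon (h : Nat) (b : Nat × Option (Nat × Nat)) : List (Nat × Nat) :=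
  match b.2 with
  | none => []
  | some ki => oneCells h (ki.1, b.1, ki.2)

-- the two best-states stay in lockstep along corresponding candidate lists
theorem relFold (h : Nat) :
    ∀ (es : List (Nat × Nat × Nat)) (b : Nat × Option (Nat × Nat)),
      (es.map (toA h)).foldl updf (b.1, recon h b)
        = ((es.foldl updB b).1, recon h (es.foldl updB b)) := by
  intro es
  induction es with
  | nil => intro b; rfl
  | cons e es ihe =>
    intro b
    rw [List.map_cons, List.foldl_cons, List.foldl_cons]
    by_cases hgt : e.2.1 > b.1
    · rw [show updf (b.1, recon h b) (toA h e) = ((updB b e).1, recon h (updB b e)) from by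
        unfold updf updB toA recon
        rw [if_pos (by simpa using hgt), if_pos hgt]]
      exact ihe (updB b e)
    · rw [show updf (b.1, recon h b) (toA h e) = (b.1, recon h b) from by
          unfold updf toA
          rw [if_neg (by simpa using hgt)],
        show updB b e = b from by unfold updB; rw [if_neg hgt]]
      exact ihe b

-- zipIdx of a mapped range, elementwise
theorem zipIdx_map_range {α : Type} (n s : Nat) (f : Nat → α) :
    ((List.range n).map f).zipIdx s = (List.range n).map (fun i => (f i, s + i)) := by
  apply List.ext_getElem
  · simp
  · intro i h1 h2
    rw [List.getElem_zipIdx]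
    simp

-- the big candidate list of B, and its correspondence with hflat ++ vflat
def bigEs (g : List (List Int)) : List (Nat × Nat × Nat) :=
  ((List.range g.length).flatMap (fun r =>
      (refRuns ((List.range (g.getD 0 []).length).map (fun c => aGet g r c))).map
        (fun t => (r, t.1, t.2.1 + t.1 - 1)))) ++
  ((List.range (g.getD 0 []).length).flatMap (fun c =>
      (refRuns ((List.range g.length).map (fun r => aGet g r c))).map
        (fun t => (g.length + c, t.1, t.2.1 + t.1 - 1))))

theorem row_take (g : List (List Int)) (r : Nat)
    (hw : (g.getD 0 []).length ≤ (g.getD r []).length) :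
    (List.range (g.getD 0 []).length).map (fun c => aGet g r c)
      = (g.getD r []).take (g.getD 0 []).length := by
  apply List.ext_getElem
  · rw [List.length_map, List.length_range, List.length_take]
    exact (Nat.min_eq_left hw).symm
  · intro i h1 h2
    simp only [List.getElem_map, List.getElem_range, List.getElem_take]
    rw [List.length_map, List.length_range] at h1
    unfold aGet
    rw [List.getD_eq_getElem _ 0 (by omega)]

theorem bigEs_toA (g : List (List Int))
    (hrows : ∀ row ∈ g, (g.getD 0 []).length ≤ row.length) :
    ((bigEs g).map (toA g.length)) = hflat g ++ vflat g := by
  have hw : ∀ r, r < g.length → (g.getD 0 []).length ≤ (g.getD r []).length := by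
    intro r hr
    apply hrows
    rw [List.getD_eq_getElem _ _ hr]
    exact List.getElem_mem hr
  unfold bigEs hflat vflat
  rw [List.map_append, List.map_flatMap, List.map_flatMap]
  congr 1
  · apply List.flatMap_congr
    intro r hr
    rw [List.map_map, row_take g r (hw r (List.mem_range.1 hr))]
    apply List.map_congr_left
    intro t ht
    obtain ⟨hp, he⟩ := refRuns_wf _ t ht
    simp only [Function.comp_apply, toA, oneCells, mkCells, shiftRun,
      if_pos (List.mem_range.1 hr), Bool.false_eq_true, if_false]
    rw [show List.range' (t.2.1 + t.1 - 1 + 1 - t.1) t.1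
        = List.range' (t.2.1 + 0) (t.2.2 + 0 - (t.2.1 + 0)) from by
      rw [show t.2.1 + t.1 - 1 + 1 - t.1 = t.2.1 + 0 from by omega,
        show t.1 = t.2.2 + 0 - (t.2.1 + 0) from by omega]]
  · apply List.flatMap_congr
    intro c _
    rw [List.map_map]
    apply List.map_congr_left
    intro t ht
    obtain ⟨hp, he⟩ := refRuns_wf _ t ht
    have hnk : ¬ (g.length + c < g.length) := by omega
    simp only [Function.comp_apply, toA, oneCells, mkCells, shiftRun, if_neg hnk,
      Nat.add_sub_cancel_left, if_true]
    rw [show List.range' (t.2.1 + t.1 - 1 + 1 - t.1) t.1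
        = List.range' (t.2.1 + 0) (t.2.2 + 0 - (t.2.1 + 0)) from by
      rw [show t.2.1 + t.1 - 1 + 1 - t.1 = t.2.1 + 0 from by omega,
        show t.1 = t.2.2 + 0 - (t.2.1 + 0) from by omega]]

-- B's outer fold equals the updB fold over the big candidate list
theorem B_outer (g : List (List Int)) :
    ((((List.range g.length).map (fun r => (List.range (g.getD 0 []).length).map (fun c => aGet g r c)))
        ++ ((List.range (g.getD 0 []).length).map (fun c => (List.range g.length).map (fun r => aGet g r c)))).zipIdx).foldl
      (fun b lk => (List.range lk.1.length).foldl (bLineStep lk.2 lk.1 (endsD lk.1) lk.1.length) b)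
      ((0 : Nat), (none : Option (Nat × Nat)))
      = (bigEs g).foldl updB ((0 : Nat), (none : Option (Nat × Nat))) := by
  have hpart : ∀ (n : Nat) (idx : Nat → Nat) (line : Nat → List Int) (b : Nat × Option (Nat × Nat)),
      ((List.range n).map (fun i => (line i, idx i))).foldl
        (fun b lk => ((refRuns lk.1).map (fun t => ((lk.2, t.1, t.2.1 + t.1 - 1) : Nat × Nat × Nat))).foldl updB b) b
      = ((List.range n).flatMap (fun i =>
          (refRuns (line i)).map (fun t => ((idx i, t.1, t.2.1 + t.1 - 1) : Nat × Nat × Nat)))).foldl updB b := by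
    intro n idx line b
    rw [List.foldl_map]
    exact pvFoldlInner (List.range n)
      (fun i => (refRuns (line i)).map (fun t => (idx i, t.1, t.2.1 + t.1 - 1))) updB b
  rw [List.zipIdx_append, zipIdx_map_range, zipIdx_map_range, List.foldl_append,
    pvFoldlCongr _ _
      (fun b (lk : List Int × Nat) =>
        ((refRuns lk.1).map (fun t => ((lk.2, t.1, t.2.1 + t.1 - 1) : Nat × Nat × Nat))).foldl updB b)
      (fun b lk _ => lineFold lk.1 lk.2 b),
    pvFoldlCongr _ _
      (fun b (lk : List Int × Nat) =>
        ((refRuns lk.1).map (fun t => ((lk.2, t.1, t.2.1 + t.1 - 1) : Nat × Nat × Nat))).foldl updB b)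
      (fun b lk _ => lineFold lk.1 lk.2 b)]
  simp only [List.length_map, List.length_range, Nat.zero_add]
  rw [hpart g.length (fun i => i)
      (fun i => (List.range (g.getD 0 []).length).map (fun c => aGet g i c)),
    hpart (g.getD 0 []).length (fun i => g.length + i)
      (fun i => (List.range g.length).map (fun r => aGet g r i))]
  unfold bigEs
  rw [List.foldl_append]

-- ===== VERDICT (by name: the statement is the Claim_ definition above) =====
theorem keep_longest_line_py_spec : Claim_equal_keep_longest_line_py := by
  intro g _ hpre
  show keep_longest_line_py g = keep_longest_line_py_alt g
  rw [A_best g hpre.2]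
  simp only [keep_longest_line_py_alt]
  rw [B_outer g]
  have hA : (hflat g ++ vflat g).foldl updf (0, ([] : List (Nat × Nat)))
      = (((bigEs g).foldl updB ((0 : Nat), none)).1,
          recon g.length ((bigEs g).foldl updB ((0 : Nat), none))) := by
    rw [← bigEs_toA g hpre.2]
    exact relFold g.length (bigEs g) ((0 : Nat), none)
  rw [hA]
  set bigB := (bigEs g).foldl updB ((0 : Nat), (none : Option (Nat × Nat))) with hbigB
  cases hb2 : bigB.2 with
  | none =>
    simp only [recon, hb2]
    rfl
  | some ki =>
    simp only [recon, hb2]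
    by_cases hk : ki.1 < g.length
    · simp only [oneCells, if_pos hk]
      rw [List.foldl_map]
    · simp only [oneCells, if_neg hk]
      rw [List.foldl_map]
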